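-- pv_equiv track=rewrite | github.com/daniel1302/advent-of-code | 2024/day-17/experiment.py | compute
-- ===== SOURCE A (Python) =====
-- def compute(a):
--     A = a
--     B = 0
--     C = 0
--
--     out = []
--     while True:
--         B = A % 8; # 2,4, bst &A
--         B = B^1 # 1, 1, bxl B 1
--
--         C = (A // (2 ** B) & 0xffffffff); # 7,5, cdv A 2** B
--         B = B ^ C # 4,6, bxc
--         A = A // 8 # 0,3, adv 3
--         B = B ^ 4 # 1,4
--         out.append(B % 8)
--
--         if A == 0:
--             break
--
--     return out;
-- ===== SOURCE B (Python) =====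
-- # Table-driven: precompute all 4096 answers for a 4-octal-digit window, split a
-- # into its octal digits once, then map a sliding window of 4 digits through the table.
-- _T = [((v & 7) ^ 1) ^ ((v >> ((v & 7) ^ 1)) & 7) ^ 4 for v in range(4096)]
--
--
-- def _octs(n):
--     # octal digits of n, least significant first
--     return [n] if n < 8 else [n & 7] + _octs(n >> 3)
--
--
-- def compute(a):
--     digs = _octs(a)
--     pad = digs + [0, 0, 0]
--     return [_T[pad[i] + 8 * pad[i + 1] + 64 * pad[i + 2] + 512 * pad[i + 3]]
--             for i in range(len(digs))]
-- ===== Notes on version B (the rewrite author's own statement) =====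
-- stated objective: alternative
-- what changed: Replaces the do-while that mutates A and recomputes B/C each round with a table-driven design: a lookup table covering every possible four-octal-digit window is precomputed once at module level, a is split into its octal digit list in a separate pass, and the output is the padded digit list mapped through the table over sliding windows of four digits.
import Mathlib
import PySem

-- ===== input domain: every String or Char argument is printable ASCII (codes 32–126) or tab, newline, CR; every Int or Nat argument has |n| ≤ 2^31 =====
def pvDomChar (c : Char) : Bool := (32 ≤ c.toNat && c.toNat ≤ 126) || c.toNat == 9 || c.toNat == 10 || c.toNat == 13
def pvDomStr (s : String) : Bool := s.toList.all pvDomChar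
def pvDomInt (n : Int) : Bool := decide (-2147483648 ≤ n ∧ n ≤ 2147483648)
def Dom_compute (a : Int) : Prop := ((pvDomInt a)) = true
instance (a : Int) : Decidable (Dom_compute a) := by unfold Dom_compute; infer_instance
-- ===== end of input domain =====

-- B is table-driven: it precomputes all 4096 answers for a 4-octal-digit window, splits a
-- into its octal digit list once, and maps sliding windows of 4 digits through the table.

-- ===== PORT A =====
-- The while-True loop; Python loops forever when a < 0 (A//8 reaches -1 and stays -1),
-- so the recursion is guarded by 0 < A' ∧ A' < A for totality only — the guard's else
-- branch is unreachable on Pre_ (0 ≤ a).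
def computeLoop (A : Int) : List Int :=
  let B1 := PySem.Int.mod A 8                      -- B = A % 8
  let B2 := PySem.Int.bxor B1 1                     -- B = B ^ 1
  -- 2 ** B: B2 ∈ [0,7] always (floor-mod by 8 is nonneg), so .toNat is exact here
  let C  := PySem.Int.band (PySem.Int.floordiv A ((2:Int) ^ B2.toNat)) 0xffffffff
  let B3 := PySem.Int.bxor B2 C                     -- B = B ^ C
  let A' := PySem.Int.floordiv A 8                  -- A = A // 8
  let B4 := PySem.Int.bxor B3 4                     -- B = B ^ 4
  let entry := PySem.Int.mod B4 8                   -- out.append(B % 8)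
  if A' = 0 then [entry]
  else if h : 0 < A' ∧ A' < A then entry :: computeLoop A'
  else [entry]
termination_by A.toNat
decreasing_by omega

def compute (a : Int) : List Int := computeLoop a

-- ===== PORT B =====
-- the module-level table _T = [((v&7)^1) ^ ((v >> ((v&7)^1)) & 7) ^ 4 for v in range(4096)]
def pvTF (v : Int) : Int :=
  PySem.Int.bxor (PySem.Int.bxor (PySem.Int.bxor (PySem.Int.band v 7) 1)
    (PySem.Int.band (v >>> (PySem.Int.bxor (PySem.Int.band v 7) 1).toNat) 7)) 4

def pvTable : List Int := (PySem.List.pyRange 0 4096 1).map pvTF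

-- termination helper for pvOcts (cited by name in its decreasing_by)
lemma pvOcts_dec (n : Int) (h : ¬ n < 8) : (n >>> (3 : Nat)).toNat < n.toNat := by
  obtain ⟨m, rfl⟩ : ∃ m : Nat, n = (m : Int) := ⟨n.toNat, by omega⟩
  have hm : 8 ≤ m := by exact_mod_cast not_lt.mp h
  have hc : ((m : Int) >>> (3 : Nat)) = ((m >>> 3 : Nat) : Int) := rfl
  rw [hc]
  simp only [Int.toNat_natCast, Nat.shiftRight_eq_div_pow]
  norm_num
  omega

-- _octs(n): octal digits of n, least significant first
def pvOcts (n : Int) : List Int :=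
  if h : n < 8 then [n] else PySem.Int.band n 7 :: pvOcts (n >>> (3 : Nat))
termination_by n.toNat
decreasing_by exact pvOcts_dec n h

def compute_alt (a : Int) : List Int :=
  let digs := pvOcts a
  let pad := digs ++ [0, 0, 0]
  (PySem.List.pyRange 0 digs.length 1).map (fun i =>
    ((PySem.List.pyGet? pvTable
      (PySem.List.pyGetD pad i 0 + 8 * PySem.List.pyGetD pad (i + 1) 0
        + 64 * PySem.List.pyGetD pad (i + 2) 0
        + 512 * PySem.List.pyGetD pad (i + 3) 0)).getD 0))

-- ===== PRECONDITION & SPEC =====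
-- Pre_ excludes a < 0: there Python A never terminates (A//8 reaches -1 and stays -1).
def Pre_compute (a : Int) : Prop := 0 ≤ a
instance (a : Int) : Decidable (Pre_compute a) := by unfold Pre_compute; infer_instance
def pvWitness_compute : Int := (9)

def Spec_compute (a : Int) (out : List Int) : Prop := out = compute_alt a
instance (a : Int) (out : List Int) : Decidable (Spec_compute a out) := by unfold Spec_compute; infer_instance

-- ===== CLAIM (what is proved, stated in full; the proofs are below) =====
def Claim_equal_compute : Prop := ∀ (a : Int), Dom_compute a → Pre_compute a → Spec_compute a (compute a)

-- ===== LEMMAS AND PROOFS =====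

-- the per-digit value, as a function of the shifted value x = a >> 3*i (same arithmetic as pvTF)
def pvG (x : Int) : Int :=
  let b := PySem.Int.bxor (PySem.Int.band x 7) 1
  PySem.Int.bxor (PySem.Int.bxor b (PySem.Int.band (x >>> b.toNat) 7)) 4

-- A's digit count, on casts of naturals
def pvN (m : Nat) : Nat := if (m : Int) = 0 then 1 else (PySem.Int.bitLength (m : Int) + 2) / 3

lemma pv_shift_cast (m k : Nat) : ((m : Int) >>> k) = ((m >>> k : Nat) : Int) := rfl

lemma pv_and_mask (n k : Nat) : n &&& (2 ^ k - 1) = n % 2 ^ k := by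
  apply Nat.eq_of_testBit_eq; intro i
  simp [Nat.testBit_mod_two_pow]

lemma pv_mod_cast (m : Nat) : PySem.Int.mod (m : Int) 8 = ((m % 8 : Nat) : Int) := by
  exact_mod_cast PySem.Int.mod_natCast m 8

lemma pv_div_cast (m : Nat) : PySem.Int.floordiv (m : Int) 8 = ((m / 8 : Nat) : Int) := by
  exact_mod_cast PySem.Int.floordiv_natCast m 8

lemma pv_bn_lt (m : Nat) : m % 8 ^^^ 1 < 8 := by
  have h1 : m % 8 < 2 ^ 3 := by omega
  have h2 : (1 : Nat) < 2 ^ 3 := by norm_num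
  exact Nat.xor_lt_two_pow h1 h2

-- head of the loop body equals pvG of the current accumulator
lemma pv_head (m : Nat) :
    PySem.Int.mod (PySem.Int.bxor (PySem.Int.bxor (PySem.Int.bxor (PySem.Int.mod (m : Int) 8) 1)
        (PySem.Int.band (PySem.Int.floordiv (m : Int)
          ((2:Int) ^ (PySem.Int.bxor (PySem.Int.mod (m : Int) 8) 1).toNat)) 0xffffffff)) 4) 8
      = pvG (m : Int) := by
  have hb : PySem.Int.bxor (PySem.Int.mod (m : Int) 8) 1 = ((m % 8 ^^^ 1 : Nat) : Int) := by
    rw [pv_mod_cast]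
    exact_mod_cast PySem.Int.bxor_natCast (m % 8) 1
  set bn : Nat := m % 8 ^^^ 1 with hbn
  have hdivc : PySem.Int.floordiv (m : Int) (((2 ^ bn : Nat) : Int)) = ((m / 2 ^ bn : Nat) : Int) := by
    exact_mod_cast PySem.Int.floordiv_natCast m (2 ^ bn)
  have htoNat : (((bn : Nat) : Int)).toNat = bn := rfl
  rw [hb]
  unfold pvG
  have hxb : PySem.Int.bxor (PySem.Int.band (m : Int) 7) 1 = ((m % 8 ^^^ 1 : Nat) : Int) := by
    have hband : PySem.Int.band (m : Int) 7 = ((m &&& 7 : Nat) : Int) := by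
      exact_mod_cast PySem.Int.band_natCast m 7
    rw [hband]
    have h7 : m &&& 7 = m % 8 := by
      have := pv_and_mask m 3; norm_num at this; exact this
    rw [h7]
    exact_mod_cast PySem.Int.bxor_natCast (m % 8) 1
  simp only [hxb, ← hbn, htoNat]
  have hpow : ((2:Int) ^ bn) = ((2 ^ bn : Nat) : Int) := by push_cast; ring
  rw [hpow, hdivc]
  rw [pv_shift_cast m bn]
  have hcast1 : PySem.Int.band ((m / 2 ^ bn : Nat) : Int) 0xffffffff
      = (((m / 2 ^ bn) &&& 0xffffffff : Nat) : Int) := by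
    exact_mod_cast PySem.Int.band_natCast (m / 2 ^ bn) 0xffffffff
  have hcast2 : PySem.Int.band ((m >>> bn : Nat) : Int) 7 = (((m >>> bn) &&& 7 : Nat) : Int) := by
    exact_mod_cast PySem.Int.band_natCast (m >>> bn) 7
  rw [hcast1, hcast2]
  have hx1 : PySem.Int.bxor ((bn : Nat) : Int) (((m / 2 ^ bn) &&& 0xffffffff : Nat) : Int)
      = ((bn ^^^ ((m / 2 ^ bn) &&& 0xffffffff) : Nat) : Int) :=
    PySem.Int.bxor_natCast _ _
  have hx2 : PySem.Int.bxor ((bn ^^^ ((m / 2 ^ bn) &&& 0xffffffff) : Nat) : Int) 4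
      = (((bn ^^^ ((m / 2 ^ bn) &&& 0xffffffff)) ^^^ 4 : Nat) : Int) := by
    exact_mod_cast PySem.Int.bxor_natCast _ 4
  have hx3 : PySem.Int.bxor ((bn : Nat) : Int) (((m >>> bn) &&& 7 : Nat) : Int)
      = ((bn ^^^ ((m >>> bn) &&& 7) : Nat) : Int) := PySem.Int.bxor_natCast _ _
  have hx4 : PySem.Int.bxor ((bn ^^^ ((m >>> bn) &&& 7) : Nat) : Int) 4
      = (((bn ^^^ ((m >>> bn) &&& 7)) ^^^ 4 : Nat) : Int) := by
    exact_mod_cast PySem.Int.bxor_natCast _ 4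
  rw [hx1, hx2, hx3, hx4, pv_mod_cast]
  -- Nat identity: ((bn ^^^ (c &&& 0xffffffff)) ^^^ 4) % 8 = (bn ^^^ (c &&& 7)) ^^^ 4
  have hblt : bn < 8 := hbn ▸ pv_bn_lt m
  congr 1
  have hsr : m >>> bn = m / 2 ^ bn := Nat.shiftRight_eq_div_pow m bn
  rw [hsr]
  have h8 : ∀ x : Nat, x % 8 = x &&& 7 := by
    intro x; have := pv_and_mask x 3; norm_num at this; omega
  rw [h8]
  rw [Nat.and_xor_distrib_right, Nat.and_xor_distrib_right]
  have h1 : bn &&& 7 = bn := by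
    have := pv_and_mask bn 3; norm_num at this; omega
  have h2 : (m / 2 ^ bn &&& 0xffffffff) &&& 7 = m / 2 ^ bn &&& 7 := by
    rw [Nat.and_assoc]
    have hmm : (0xffffffff : Nat) &&& 7 = 7 := rfl
    rw [hmm]
  have h3 : (4 : Nat) &&& 7 = 4 := rfl
  rw [h1, h2, h3]

-- digit shift: shifted value i of m/8 is shifted value i+1 of m
lemma pv_shift (m : Nat) (i : Nat) :
    (((m / 8 : Nat) : Int) >>> (3 * i : Nat)) = ((m : Int) >>> (3 * (i + 1) : Nat)) := by
  rw [pv_shift_cast, pv_shift_cast]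
  congr 1
  rw [Nat.shiftRight_eq_div_pow, Nat.shiftRight_eq_div_pow, Nat.div_div_eq_div_mul]
  congr 1
  have h83 : (8 : Nat) = 2 ^ 3 := rfl
  rw [h83, ← pow_add]
  ring_nf

lemma pv_bitLength_div8 (m : Nat) (h : 8 ≤ m) :
    PySem.Int.bitLength (m : Int) = PySem.Int.bitLength ((m / 8 : Nat) : Int) + 3 := by
  have h1 := PySem.Int.bitLength_natCast (m := m) (by omega)
  have h2 := PySem.Int.bitLength_natCast (m := m / 2) (by omega)
  have h3 := PySem.Int.bitLength_natCast (m := m / 4) (by omega)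
  have e1 : m / 2 / 2 = m / 4 := by rw [Nat.div_div_eq_div_mul]
  have e2 : m / 4 / 2 = m / 8 := by rw [Nat.div_div_eq_div_mul]
  rw [e1] at h2
  rw [e2] at h3
  rw [h1, h2, h3]

lemma pv_cnt_small (m : Nat) (h : m < 8) : pvN m = 1 := by
  unfold pvN
  by_cases hz : m = 0
  · simp [hz]
  · have hm0 : (m : Int) ≠ 0 := Nat.cast_ne_zero.mpr hz
    rw [if_neg hm0]
    have hlow := PySem.Int.two_pow_bitLength_le (m : Int) hm0
    have hhigh := PySem.Int.lt_two_pow_bitLength (m : Int)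
    have hna : ((m : Int)).natAbs = m := rfl
    rw [hna] at hlow hhigh
    set L := PySem.Int.bitLength (m : Int) with hL
    have hL1 : 1 ≤ L := by
      rcases Nat.eq_zero_or_pos L with h0 | h0
      · rw [h0] at hhigh; omega
      · omega
    have hL3 : L ≤ 3 := by
      by_contra hc
      have : 2 ^ 3 ≤ 2 ^ (L - 1) := Nat.pow_le_pow_right (by norm_num) (by omega)
      omega
    omega

lemma pv_cnt_step (m : Nat) (h : 8 ≤ m) : pvN m = pvN (m / 8) + 1 := by
  unfold pvN
  have hm0 : (m : Int) ≠ 0 := Nat.cast_ne_zero.mpr (by omega)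
  have hq0 : ((m / 8 : Nat) : Int) ≠ 0 := Nat.cast_ne_zero.mpr (by omega)
  rw [if_neg hm0, if_neg hq0, pv_bitLength_div8 m h]
  omega

lemma pv_sh0 (m : Nat) : ((m : Int) >>> (3 * 0 : Nat)) = (m : Int) := by
  rw [pv_shift_cast]
  norm_num

-- main invariant for A: the loop on ↑m produces pvG of the shifted values, pvN m of them
lemma pv_main : ∀ m : Nat, computeLoop (m : Int) =
    (List.range (pvN m)).map (fun i => pvG ((m : Int) >>> (3 * i : Nat))) := by
  intro m
  induction m using Nat.strong_induction_on with
  | _ m ih =>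
    rw [computeLoop]
    simp only [pv_div_cast]
    by_cases hsmall : m < 8
    · have hq : m / 8 = 0 := by omega
      have hz : ((m / 8 : Nat) : Int) = 0 := by rw [hq]; rfl
      rw [if_pos hz, pv_cnt_small m hsmall]
      simp only [List.range_one, List.map_cons, List.map_nil]
      rw [pv_sh0 m]
      exact congrArg (fun x => [x]) (pv_head m)
    · have h8 : 8 ≤ m := by omega
      have hz : ¬ ((m / 8 : Nat) : Int) = 0 := Nat.cast_ne_zero.mpr (by omega)
      rw [if_neg hz]
      have hguard : 0 < ((m / 8 : Nat) : Int) ∧ ((m / 8 : Nat) : Int) < (m : Int) := by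
        constructor
        · exact_mod_cast Nat.pos_of_ne_zero (by omega)
        · exact_mod_cast Nat.div_lt_self (by omega) (by norm_num)
      rw [dif_pos hguard]
      rw [ih (m / 8) (Nat.div_lt_self (by omega) (by norm_num)), pv_cnt_step m h8]
      rw [List.range_succ_eq_map]
      simp only [List.map_cons, List.map_map]
      congr 1
      · rw [pv_sh0 m]
        exact pv_head m
      · apply List.map_congr_left
        intro i _
        simp only [Function.comp]
        rw [pv_shift m i]

-- ===== B-side lemmas =====

lemma pv_shift_nat (m i : Nat) : (m / 8) >>> (3 * i) = m >>> (3 * (i + 1)) := by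
  rw [Nat.shiftRight_eq_div_pow, Nat.shiftRight_eq_div_pow, Nat.div_div_eq_div_mul]
  congr 1
  rw [show (8 : Nat) = 2 ^ 3 from rfl, ← pow_add]
  congr 1
  ring

-- _octs on ↑m is the list of octal digits, least significant first, pvN m of them
lemma pv_octs_eq : ∀ m : Nat, pvOcts (m : Int) =
    (List.range (pvN m)).map (fun i => (((m >>> (3 * i)) % 8 : Nat) : Int)) := by
  intro m
  induction m using Nat.strong_induction_on with
  | _ m ih =>
    rw [pvOcts]
    by_cases hsmall : m < 8
    · have hlt : (m : Int) < 8 := by exact_mod_cast hsmall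
      rw [dif_pos hlt, pv_cnt_small m hsmall]
      simp only [List.range_one, List.map_cons, List.map_nil]
      have hsm : m >>> (3 * 0) % 8 = m := by
        rw [Nat.mul_zero, Nat.shiftRight_zero]; omega
      rw [hsm]
    · have h8 : 8 ≤ m := by omega
      have hlt : ¬ (m : Int) < 8 := by exact_mod_cast hsmall
      rw [dif_neg hlt]
      have hsh : ((m : Int) >>> (3 : Nat)) = ((m / 8 : Nat) : Int) := by
        rw [pv_shift_cast]
        congr 1
        rw [Nat.shiftRight_eq_div_pow]
      rw [hsh, ih (m / 8) (Nat.div_lt_self (by omega) (by norm_num)), pv_cnt_step m h8]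
      rw [List.range_succ_eq_map]
      simp only [List.map_cons, List.map_map]
      congr 1
      · have hband : PySem.Int.band (m : Int) 7 = ((m &&& 7 : Nat) : Int) := by
          exact_mod_cast PySem.Int.band_natCast m 7
        rw [hband]
        congr 1
        have := pv_and_mask m 3; norm_num at this
        rw [this]
        simp [Nat.shiftRight_eq_div_pow]
      · apply List.map_congr_left
        intro i _
        simp only [Function.comp]
        rw [pv_shift_nat]

-- shifted values vanish at and beyond pvN m
lemma pv_shift_zero (m j : Nat) (h : pvN m ≤ j) : m >>> (3 * j) = 0 := by
  have hhigh := PySem.Int.lt_two_pow_bitLength (m : Int)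
  have hna : ((m : Int)).natAbs = m := rfl
  rw [hna] at hhigh
  have hL : PySem.Int.bitLength (m : Int) ≤ 3 * pvN m := by
    unfold pvN
    by_cases hz : (m : Int) = 0
    · rw [if_pos hz, hz, PySem.Int.bitLength_zero]
      norm_num
    · rw [if_neg hz]
      omega
  have hm : m < 2 ^ (3 * j) := by
    calc m < 2 ^ PySem.Int.bitLength (m : Int) := hhigh
    _ ≤ 2 ^ (3 * j) := Nat.pow_le_pow_right (by norm_num) (by omega)
  rw [Nat.shiftRight_eq_div_pow]
  exact Nat.div_eq_of_lt hm

-- every pad entry (getD, default 0) is the corresponding octal digit of m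
lemma pv_pad_getD (m j : Nat) :
    ((List.range (pvN m)).map (fun i => (((m >>> (3 * i)) % 8 : Nat) : Int)) ++ [0, 0, 0]).getD j 0
      = (((m >>> (3 * j)) % 8 : Nat) : Int) := by
  by_cases hj : j < pvN m
  · rw [List.getD_eq_getElem _ _ (by simp [List.length_append]; omega)]
    rw [List.getElem_append_left (by simp; omega)]
    simp
  · rw [pv_shift_zero m j (by omega)]
    by_cases hj3 : j < pvN m + 3
    · rw [List.getD_eq_getElem _ _ (by simp [List.length_append]; omega)]
      rw [List.getElem_append_right (by simp; omega)]
      simp only [List.length_map, List.length_range]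
      have h3 : j - pvN m = 0 ∨ j - pvN m = 1 ∨ j - pvN m = 2 := by omega
      rcases h3 with h | h | h <;> simp [h]
    · rw [List.getD_eq_default _ _ (by simp [List.length_append]; omega)]
      norm_num

-- the window of four octal digits is the low 12 bits of the shifted value
lemma pv_window (x : Nat) :
    x % 8 + 8 * (x >>> 3 % 8) + 64 * (x >>> 6 % 8) + 512 * (x >>> 9 % 8) = x % 4096 := by
  simp only [Nat.shiftRight_eq_div_pow]
  norm_num
  omega

-- let-free form of pvG (used to rewrite under the two applications)
lemma pvG_eq (x : Int) : pvG x =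
    PySem.Int.bxor (PySem.Int.bxor (PySem.Int.bxor (PySem.Int.band x 7) 1)
      (PySem.Int.band (x >>> (PySem.Int.bxor (PySem.Int.band x 7) 1).toNat) 7)) 4 := rfl

-- pvG only reads the low 12 bits of its (nonnegative) argument
lemma pv_low12 (x : Nat) : pvG (((x % 4096 : Nat) : Int)) = pvG ((x : Nat) : Int) := by
  rw [pvG_eq, pvG_eq]
  have hband : ∀ y : Nat, PySem.Int.band ((y : Nat) : Int) 7 = ((y &&& 7 : Nat) : Int) := by
    intro y; exact_mod_cast PySem.Int.band_natCast y 7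
  have h7 : ∀ y : Nat, y &&& 7 = y % 8 := by
    intro y; have := pv_and_mask y 3; norm_num at this; omega
  have hx : PySem.Int.band (((x % 4096 : Nat) : Int)) 7 = ((x % 8 : Nat) : Int) := by
    rw [hband, h7, Nat.mod_mod_of_dvd x (by norm_num)]
  have hx' : PySem.Int.band ((x : Nat) : Int) 7 = ((x % 8 : Nat) : Int) := by
    rw [hband, h7]
  rw [hx, hx']
  have hbx : PySem.Int.bxor ((x % 8 : Nat) : Int) 1 = ((x % 8 ^^^ 1 : Nat) : Int) := by
    exact_mod_cast PySem.Int.bxor_natCast (x % 8) 1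
  rw [hbx]
  set bn : Nat := x % 8 ^^^ 1 with hbndef
  have hblt : bn < 8 := hbndef ▸ pv_bn_lt x
  have htoNat : (((bn : Nat) : Int)).toNat = bn := rfl
  rw [htoNat]
  congr 2
  rw [pv_shift_cast, pv_shift_cast, hband, hband]
  congr 1
  rw [h7, h7, Nat.shiftRight_eq_div_pow, Nat.shiftRight_eq_div_pow]
  have hsplit : (4096 : Nat) = 2 ^ bn * 2 ^ (12 - bn) := by
    rw [← pow_add, show bn + (12 - bn) = 12 by omega]
    norm_num
  rw [hsplit, Nat.mod_mul_right_div_self]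
  exact Nat.mod_mod_of_dvd _ ⟨2 ^ (9 - bn),
    by rw [show (8 : Nat) = 2 ^ 3 from rfl, ← pow_add, show 3 + (9 - bn) = 12 - bn by omega]⟩

-- table lookup: _T[w] = pvG w for 0 ≤ w < 4096
lemma pv_table_get (w : Nat) (h : w < 4096) :
    (PySem.List.pyGet? pvTable ((w : Nat) : Int)).getD 0 = pvG ((w : Nat) : Int) := by
  unfold pvTable
  rw [PySem.List.pyGet?_natCast]
  rw [show (4096 : Int) = ((4096 : Nat) : Int) from rfl]
  rw [PySem.List.getElem?_map_pyRange_zero pvTF 4096 w h]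
  rfl

-- ===== VERDICT (by name: the statement is the Claim_ definition above) =====
theorem compute_spec : Claim_equal_compute := by
  intro a _ hpre
  unfold Pre_compute at hpre
  unfold Spec_compute compute compute_alt
  obtain ⟨m, rfl⟩ : ∃ m : Nat, a = (m : Int) := ⟨a.toNat, by omega⟩
  rw [pv_main m]
  simp only [pv_octs_eq m]
  rw [List.length_map, List.length_range]
  rw [PySem.List.pyRange_zero_nat]
  rw [List.map_map]
  apply List.map_congr_left
  intro i hi
  rw [List.mem_range] at hi
  simp only [Function.comp]
  -- rewrite the four pad lookups
  have hg : ∀ (k : Nat),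
      PySem.List.pyGetD ((List.range (pvN m)).map (fun i => (((m >>> (3 * i)) % 8 : Nat) : Int)) ++ [0, 0, 0]) ((k : Nat) : Int) 0
        = (((m >>> (3 * k)) % 8 : Nat) : Int) := by
    intro k
    rw [PySem.List.pyGetD_natCast]
    exact pv_pad_getD m k
  have h1 : ((i : Int) + 1) = (((i + 1 : Nat)) : Int) := by push_cast; ring
  have h2 : ((i : Int) + 2) = (((i + 2 : Nat)) : Int) := by push_cast; ring
  have h3 : ((i : Int) + 3) = (((i + 3 : Nat)) : Int) := by push_cast; ring
  rw [h1, h2, h3, hg i, hg (i + 1), hg (i + 2), hg (i + 3)]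
  -- fold the window into a single Nat cast
  have hsum : ((((m >>> (3 * i)) % 8 : Nat) : Int) + 8 * (((m >>> (3 * (i + 1))) % 8 : Nat) : Int)
      + 64 * (((m >>> (3 * (i + 2))) % 8 : Nat) : Int) + 512 * (((m >>> (3 * (i + 3))) % 8 : Nat) : Int))
      = (((m >>> (3 * i)) % 4096 : Nat) : Int) := by
    have hs : ∀ k : Nat, m >>> (3 * (i + k)) = (m >>> (3 * i)) >>> (3 * k) := by
      intro k
      rw [show 3 * (i + k) = 3 * i + 3 * k by ring, Nat.shiftRight_add]
    rw [hs 1, hs 2, hs 3]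
    exact_mod_cast congrArg (fun n : Nat => (n : Int)) (pv_window (m >>> (3 * i)))
  rw [hsum]
  rw [pv_table_get _ (Nat.mod_lt _ (by norm_num))]
  rw [pv_low12]
  rfl
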